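-- pv_equiv track=rewrite | github.com/MaximeMoutet13/Stage_2020 | tbs/contextmatrix/_order.py | is_doubly_lexically_ordered
-- ===== SOURCE A (Python) =====
-- def is_doubly_lexically_ordered(matrix):
--     """Test if the matrix is doubly lexically ordered.
--
--     :param matrix: O/1 matrix
--     :type matrix: list of list of 0/1 elements
--
--     :rtype: bool
--     """
--     for i in range(len(matrix)):
--         for j in range(len(matrix[i])):
--             if matrix[i][j] == 0:
--                 continue
--             for j_next in range(j + 1, len(matrix[i])):
--                 if matrix[i][j_next] == 0:
--                     line_ordered = False
--                     for i_next in range(i + 1, len(matrix)):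
--                         if matrix[i_next][j] == 0 and matrix[i_next][j_next] == 1:
--                             line_ordered = True
--                             break
--                     if not line_ordered:
--                         return False
--             for i_next in range(i + 1, len(matrix)):
--                 if matrix[i_next][j] == 0:
--                     column_ordered = False
--                     for j_next in range(j + 1, len(matrix[i])):
--                         if matrix[i][j_next] == 0 and matrix[i_next][j_next] == 1:
--                             column_ordered = True
--                             break
--                     if not column_ordered:
--                         return False
--
--     return True
-- ===== SOURCE B (Python) =====
-- def is_doubly_lexically_ordered(matrix):
--     """Test if the matrix is doubly lexically ordered (rectangular matrix).
--
--     Per-pair sweep: for each pair of columns, one bottom-up pass over the rows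
--     maintaining whether a (0,1) witness row exists below; symmetrically for rows.
--     """
--     n = len(matrix)
--     if n == 0:
--         return True
--     m = len(matrix[0])
--
--     def sweep(count, bad, wit):
--         ok = False
--         for k in range(count - 1, -1, -1):
--             if bad(k) and not ok:
--                 return False
--             if wit(k):
--                 ok = True
--         return True
--
--     for j in range(m):
--         for jn in range(j + 1, m):
--             if not sweep(n,
--                          lambda i: matrix[i][j] != 0 and matrix[i][jn] == 0,
--                          lambda i: matrix[i][j] == 0 and matrix[i][jn] == 1):
--                 return False
--     for i in range(n):
--         for inx in range(i + 1, n):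
--             if not sweep(m,
--                          lambda j: matrix[i][j] != 0 and matrix[inx][j] == 0,
--                          lambda j: matrix[i][j] == 0 and matrix[inx][j] == 1):
--                 return False
--     return True
-- ===== Notes on version B (the rewrite author's own statement) =====
-- stated objective: alternative
-- what changed: Instead of re-scanning all later rows/columns for a witness at every 1-0 pattern, B enumerates each column pair (and each row pair) once and does a single bottom-up (right-to-left) sweep maintaining a flag 'a 0/1 witness exists further down', removing the innermost scan (O(n m^2 + n^2 m) worst case vs A's O(n^2 m^2), though not measurably faster on the generated inputs).
-- outside the precondition, e.g. on is_doubly_lexically_ordered([[1, 0], [1]]): A returns False, B raises IndexError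
import Mathlib
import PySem

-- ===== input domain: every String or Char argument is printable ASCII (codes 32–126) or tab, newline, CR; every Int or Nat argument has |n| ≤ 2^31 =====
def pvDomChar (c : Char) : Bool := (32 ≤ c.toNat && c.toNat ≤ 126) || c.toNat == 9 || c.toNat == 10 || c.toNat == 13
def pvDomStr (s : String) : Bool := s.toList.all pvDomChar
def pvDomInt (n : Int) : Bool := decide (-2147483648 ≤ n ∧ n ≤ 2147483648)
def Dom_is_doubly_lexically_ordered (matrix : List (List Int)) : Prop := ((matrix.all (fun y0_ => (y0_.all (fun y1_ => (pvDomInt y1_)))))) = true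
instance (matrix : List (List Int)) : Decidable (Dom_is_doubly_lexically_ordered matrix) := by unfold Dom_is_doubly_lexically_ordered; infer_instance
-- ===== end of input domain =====

-- B replaces A's per-cell inner witness re-scan by one bottom-up / right-to-left sweep per
-- column pair / row pair that maintains an "a 0/1 witness exists below" flag (alternative
-- algorithm); rectangular input assumed (Pre_), since A may raise IndexError on ragged input.


-- matrix[i][j] for in-range nat indices (Pre_ keeps all uses in range)
def pvEntry (matrix : List (List Int)) (i j : Nat) : Int := (matrix.getD i []).getD j 0

-- ===== PORT A =====
def is_doubly_lexically_ordered (matrix : List (List Int)) : Bool :=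
  (List.range matrix.length).all fun i =>
    (List.range (matrix.getD i []).length).all fun j =>
      if pvEntry matrix i j = 0 then true
      else
        ((List.range' (j+1) ((matrix.getD i []).length - (j+1))).all fun jn =>
          if pvEntry matrix i jn = 0 then
            (List.range' (i+1) (matrix.length - (i+1))).any fun i' =>
              decide (pvEntry matrix i' j = 0) && decide (pvEntry matrix i' jn = 1)
          else true) &&
        ((List.range' (i+1) (matrix.length - (i+1))).all fun i' =>
          if pvEntry matrix i' j = 0 then
            (List.range' (j+1) ((matrix.getD i []).length - (j+1))).any fun jn =>
              decide (pvEntry matrix i jn = 0) && decide (pvEntry matrix i' jn = 1)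
          else true)

-- ===== PORT B =====
-- the sweep helper of Source B: indices in reverse, flag `ok` = witness already seen
def sweepB (bad wit : Nat → Bool) : List Nat → Bool → Bool
  | [], _ => true
  | k :: rest, ok => if bad k && !ok then false else sweepB bad wit rest (ok || wit k)

def is_doubly_lexically_ordered_alt (matrix : List (List Int)) : Bool :=
  let n := matrix.length
  if n = 0 then true
  else
    let m := (matrix.getD 0 []).length
    ((List.range m).all fun j =>
      (List.range' (j+1) (m - (j+1))).all fun jn =>
        sweepB (fun i => !(decide (pvEntry matrix i j = 0)) && decide (pvEntry matrix i jn = 0))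
               (fun i => decide (pvEntry matrix i j = 0) && decide (pvEntry matrix i jn = 1))
               ((List.range n).reverse) false) &&
    ((List.range n).all fun i =>
      (List.range' (i+1) (n - (i+1))).all fun i' =>
        sweepB (fun j => !(decide (pvEntry matrix i j = 0)) && decide (pvEntry matrix i' j = 0))
               (fun j => decide (pvEntry matrix i j = 0) && decide (pvEntry matrix i' j = 1))
               ((List.range m).reverse) false)

-- ===== PRECONDITION & SPEC =====
-- Pre_ excludes ragged (non-rectangular) matrices: there A may raise IndexError, and when it
-- happens to return early its value is an accident of the scan order; B assumes a rectangle.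
def Pre_is_doubly_lexically_ordered (matrix : List (List Int)) : Prop :=
  ∀ row ∈ matrix, row.length = (matrix.getD 0 []).length
instance (matrix : List (List Int)) : Decidable (Pre_is_doubly_lexically_ordered matrix) := by
  unfold Pre_is_doubly_lexically_ordered; infer_instance

def pvWitness_is_doubly_lexically_ordered : List (List Int) := [[1, 1], [0, 1]]

def Spec_is_doubly_lexically_ordered (matrix : List (List Int)) (out : Bool) : Prop := out = is_doubly_lexically_ordered_alt matrix
instance (matrix : List (List Int)) (out : Bool) : Decidable (Spec_is_doubly_lexically_ordered matrix out) := by unfold Spec_is_doubly_lexically_ordered; infer_instance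

-- ===== CLAIM (what is proved, stated in full; the proofs are below) =====
def Claim_equal_is_doubly_lexically_ordered : Prop := ∀ (matrix : List (List Int)), Dom_is_doubly_lexically_ordered matrix → Pre_is_doubly_lexically_ordered matrix → Spec_is_doubly_lexically_ordered matrix (is_doubly_lexically_ordered matrix)

-- ===== LEMMAS AND PROOFS =====

-- invariant of the sweep: it succeeds iff every "bad" index has the flag set or a witness above it
lemma sweepB_range_rev (bad wit : Nat → Bool) (n : Nat) (ok : Bool) :
    sweepB bad wit ((List.range n).reverse) ok = true ↔
      ∀ i < n, bad i = true → ok = true ∨ ∃ i', i < i' ∧ i' < n ∧ wit i' = true := by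
  induction n generalizing ok with
  | zero => simp [sweepB]
  | succ n ih =>
    rw [List.range_succ]
    simp only [List.reverse_append, List.reverse_cons, List.reverse_nil, List.nil_append,
      List.cons_append]
    show sweepB bad wit (n :: (List.range n).reverse) ok = true ↔ _
    rw [sweepB]
    cases hb : bad n <;> cases hok : ok <;> simp [ih]
    · -- bad n = false, ok = false
      constructor
      · intro h i hi hbi
        have hin : i ≠ n := fun he => by rw [he, hb] at hbi; exact Bool.false_ne_true hbi
        rcases h i (by omega) hbi with h' | ⟨i', h1, h2, h3⟩
        · exact ⟨n, by omega, by omega, h'⟩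
        · exact ⟨i', h1, by omega, h3⟩
      · intro h i hi hbi
        rcases h i (by omega) hbi with ⟨i', h1, h2, h3⟩
        by_cases hin' : i' = n
        · rw [hin'] at h3; exact Or.inl h3
        · exact Or.inr ⟨i', h1, by omega, h3⟩
    · -- bad n = true, ok = false
      exact ⟨n, le_refl n, hb, fun x1 h1 h2 => absurd (lt_of_lt_of_le h1 h2) (lt_irrefl n)⟩

lemma rowlen_eq (matrix : List (List Int)) (h : Pre_is_doubly_lexically_ordered matrix)
    (i : Nat) (hi : i < matrix.length) :
    (matrix.getD i []).length = (matrix.getD 0 []).length := by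
  have hmem : matrix.getD i [] ∈ matrix := by
    rw [List.getD_eq_getElem matrix [] hi]
    exact List.getElem_mem hi
  exact h _ hmem

-- ===== VERDICT (by name: the statement is the Claim_ definition above) =====
theorem is_doubly_lexically_ordered_spec : Claim_equal_is_doubly_lexically_ordered := by
  intro matrix _ hpre
  unfold Spec_is_doubly_lexically_ordered
  unfold is_doubly_lexically_ordered is_doubly_lexically_ordered_alt
  by_cases hn : matrix.length = 0
  · simp [hn]
  · simp only []
    rw [if_neg hn]
    rw [show ∀ (a b : Bool), a = b ↔ (a = true ↔ b = true) from by intro a b; cases a <;> cases b <;> simp]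
    simp only [List.all_eq_true, Bool.and_eq_true, List.mem_range,
      List.mem_range'_1, sweepB_range_rev, Bool.not_eq_true', decide_eq_true_eq,
      decide_eq_false_iff_not, Bool.false_eq_true, false_or]
    constructor
    · intro h
      constructor
      · -- row condition, B's shape
        intro j hj jn hjn i hi hbad
        have hrl := rowlen_eq matrix hpre i hi
        have h' := h i hi j (by rw [hrl]; omega)
        rw [if_neg hbad.1, Bool.and_eq_true] at h'
        obtain ⟨hline, _⟩ := h'
        rw [List.all_eq_true] at hline
        have hx := hline jn (by rw [List.mem_range'_1]; rw [hrl]; omega)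
        rw [if_pos hbad.2, List.any_eq_true] at hx
        obtain ⟨i', hmem, hw⟩ := hx
        rw [List.mem_range'_1] at hmem
        simp only [Bool.and_eq_true, decide_eq_true_eq] at hw
        exact ⟨i', by omega, by omega, hw.1, hw.2⟩
      · -- column condition, B's shape
        intro i hi i' hi' j hj hbad
        have hrl := rowlen_eq matrix hpre i hi
        have h' := h i hi j (by rw [hrl]; omega)
        rw [if_neg hbad.1, Bool.and_eq_true] at h'
        obtain ⟨_, hcol⟩ := h'
        rw [List.all_eq_true] at hcol
        have hx := hcol i' (by rw [List.mem_range'_1]; omega)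
        rw [if_pos hbad.2, List.any_eq_true] at hx
        obtain ⟨jn, hmem, hw⟩ := hx
        rw [List.mem_range'_1, hrl] at hmem
        simp only [Bool.and_eq_true, decide_eq_true_eq] at hw
        exact ⟨jn, by omega, by omega, hw.1, hw.2⟩
    · rintro ⟨hrow, hcol⟩ i hi j hj
      have hrl := rowlen_eq matrix hpre i hi
      rw [hrl] at hj
      by_cases hz : pvEntry matrix i j = 0
      · rw [if_pos hz]
      · rw [if_neg hz, Bool.and_eq_true]
        constructor
        · rw [List.all_eq_true]
          intro jn hmem
          rw [List.mem_range'_1, hrl] at hmem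
          by_cases hz' : pvEntry matrix i jn = 0
          · rw [if_pos hz', List.any_eq_true]
            obtain ⟨i', h1, h2, h3, h4⟩ := hrow j hj jn hmem i hi ⟨hz, hz'⟩
            exact ⟨i', by rw [List.mem_range'_1]; omega, by simp [h3, h4]⟩
          · rw [if_neg hz']
        · rw [List.all_eq_true]
          intro i' hmem
          rw [List.mem_range'_1] at hmem
          by_cases hz' : pvEntry matrix i' j = 0
          · rw [if_pos hz', List.any_eq_true]
            obtain ⟨jn, h1, h2, h3, h4⟩ := hcol i hi i' hmem j hj ⟨hz, hz'⟩
            exact ⟨jn, by rw [List.mem_range'_1, hrl]; omega, by simp [h3, h4]⟩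
          · rw [if_neg hz']
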